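-- pv_equiv track=rewrite | github.com/Andryz90/HackRomProject | docs/Documentation_Sites/porydex/porydex/parse/species.py | _normalize_form_label
-- ===== SOURCE A (Python) =====
-- def _normalize_form_label(label: str) -> str:
--     """Normalize form labels to Pokémon Showdown naming conventions.
--
--     Some datasets use demonyms like 'Hisuian/Alolan/Galarian/Paldean' while Showdown
--     sprite and dex naming typically use the region name: 'Hisui/Alola/Galar/Paldea'.
--     """
--     if not label:
--         return label
--
--     regional = {
--         'Hisuian': 'Hisui',
--         'Alolan': 'Alola',
--         'Galarian': 'Galar',
--         'Paldean': 'Paldea',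
--     }
--
--     for src, dst in regional.items():
--         if label == src:
--             return dst
--         if label.startswith(src + '-'):
--             return dst + label[len(src):]  # keep suffix (e.g. '-Tera')
--     return label
-- ===== SOURCE B (Python) =====
-- def _normalize_form_label(label: str) -> str:
--     """Normalize form labels to Pokémon Showdown naming conventions."""
--     if not label:
--         return label
--
--     regional = {
--         'Hisuian': 'Hisui',
--         'Alolan': 'Alola',
--         'Galarian': 'Galar',
--         'Paldean': 'Paldea',
--     }
--
--     head, sep, rest = label.partition('-')
--     if head in regional:
--         return regional[head] + sep + rest
--     return label
-- ===== Notes on version B (the rewrite author's own statement) =====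
-- stated objective: simpler
-- what changed: Replaces the scan over the regional dict with an equality and startswith test per key by one structural split of the label at its first hyphen followed by a single dict lookup of the head.
import Mathlib
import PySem

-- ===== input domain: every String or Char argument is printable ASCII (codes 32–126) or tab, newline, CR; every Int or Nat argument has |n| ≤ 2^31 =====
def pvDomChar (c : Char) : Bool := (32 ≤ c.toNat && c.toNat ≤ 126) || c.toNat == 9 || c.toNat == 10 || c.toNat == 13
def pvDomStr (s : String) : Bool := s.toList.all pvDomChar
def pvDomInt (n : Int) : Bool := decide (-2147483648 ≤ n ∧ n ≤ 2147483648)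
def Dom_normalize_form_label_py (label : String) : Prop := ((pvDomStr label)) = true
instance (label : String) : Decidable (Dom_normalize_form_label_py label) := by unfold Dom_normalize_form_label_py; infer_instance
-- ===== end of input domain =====

-- B splits the label once at the first hyphen and does a single dict lookup of the head,
-- instead of A's per-key equality/startswith scan; objective: simpler.


-- ===== PORT A =====
-- the literal 'regional' dict of A, as an association list over List Char
def pvRegional : List (List Char × List Char) :=
  [("Hisuian".toList, "Hisui".toList),
   ("Alolan".toList, "Alola".toList),
   ("Galarian".toList, "Galar".toList),
   ("Paldean".toList, "Paldea".toList)]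

-- A's 'for src, dst in regional.items()' loop with its two early returns; none = fell through
def pvLoopA : List (List Char × List Char) → List Char → Option (List Char)
  | [], _ => none
  | (src, dst) :: rest, lab =>
    if lab = src then some dst
    else if PySem.Chars.startswith lab (src ++ ['-']) then
      some (dst ++ PySem.List.slice lab (some (src.length : Int)) none)  -- label[len(src):]
    else pvLoopA rest lab

def normalize_form_label_py (label : String) : String :=
  if label.toList = [] then label      -- if not label: return label
  else
    match pvLoopA pvRegional label.toList with
    | some r => String.ofList r
    | none => label

-- ===== PORT B =====
-- label.partition('-') for the single-char separator '-': exact; B only ever uses sep + rest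
-- concatenated, so the port returns (head, sep ++ rest) as one pair.
def pvPartitionHyphen : List Char → List Char × List Char
  | [] => ([], [])
  | c :: cs =>
    if c = '-' then ([], c :: cs)
    else
      let p := pvPartitionHyphen cs
      (c :: p.1, p.2)

def normalize_form_label_py_alt (label : String) : String :=
  if label.toList = [] then label
  else
    let p := pvPartitionHyphen label.toList
    match PySem.Dict.get? (PySem.Dict.mk pvRegional) p.1 with
    | some dst => String.ofList (dst ++ p.2)
    | none => label

-- ===== PRECONDITION & SPEC =====
def Spec_normalize_form_label_py (label : String) (out : String) : Prop := out = normalize_form_label_py_alt label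
instance (label : String) (out : String) : Decidable (Spec_normalize_form_label_py label out) := by unfold Spec_normalize_form_label_py; infer_instance

-- ===== CLAIM (what is proved, stated in full; the proofs are below) =====
def Claim_equal_normalize_form_label_py : Prop := ∀ (label : String), Dom_normalize_form_label_py label → Spec_normalize_form_label_py label (normalize_form_label_py label)

-- ===== LEMMAS AND PROOFS =====

-- partition reassembles the label
lemma pvPartition_append (lab : List Char) :
    (pvPartitionHyphen lab).1 ++ (pvPartitionHyphen lab).2 = lab := by
  induction lab with
  | nil => simp [pvPartitionHyphen]
  | cons c cs ih =>
    by_cases h : c = '-' <;> simp [pvPartitionHyphen, h, ih]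

-- the tail is empty or starts with '-'
lemma pvPartition_snd (lab : List Char) :
    (pvPartitionHyphen lab).2 = [] ∨ ∃ r, (pvPartitionHyphen lab).2 = '-' :: r := by
  induction lab with
  | nil => simp [pvPartitionHyphen]
  | cons c cs ih =>
    by_cases h : c = '-' <;> simp [pvPartitionHyphen, h, ih]

lemma pvPartition_of_no_hyphen (lab : List Char) (h : '-' ∉ lab) :
    pvPartitionHyphen lab = (lab, []) := by
  induction lab with
  | nil => simp [pvPartitionHyphen]
  | cons c cs ih =>
    simp only [List.mem_cons, not_or] at h
    have hc : c ≠ '-' := fun hc => h.1 hc.symm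
    simp [pvPartitionHyphen, hc, ih h.2]

lemma pvPartition_hyphen_split (s r : List Char) (h : '-' ∉ s) :
    pvPartitionHyphen (s ++ '-' :: r) = (s, '-' :: r) := by
  induction s with
  | nil => simp [pvPartitionHyphen]
  | cons c cs ih =>
    simp only [List.mem_cons, not_or] at h
    have hc : c ≠ '-' := fun hc => h.1 hc.symm
    simp [pvPartitionHyphen, hc, ih h.2]

-- one step of A's loop when the head equals this key
lemma pvLoopA_hit (src dst : List Char) (rest : List (List Char × List Char)) (lab : List Char)
    (hs : '-' ∉ src) (hh : (pvPartitionHyphen lab).1 = src) :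
    pvLoopA ((src, dst) :: rest) lab = some (dst ++ (pvPartitionHyphen lab).2) := by
  have hsplit := pvPartition_append lab
  rcases pvPartition_snd lab with ht | ⟨r, ht⟩
  · -- no hyphen found: lab = src, the equality branch fires
    rw [hh, ht] at hsplit
    simp only [List.append_nil] at hsplit
    rw [ht]
    simp [pvLoopA, hsplit.symm]
  · -- lab = src ++ '-' :: r: the startswith branch fires
    rw [hh, ht] at hsplit
    have hlab : lab = src ++ '-' :: r := hsplit.symm
    by_cases heq : lab = src
    · exfalso; rw [heq] at hlab
      have := congrArg List.length hlab; simp at this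
    · have hsw : PySem.Chars.startswith lab (src ++ ['-']) = true := by
        simp only [PySem.Chars.startswith, hlab, List.isPrefixOf_iff_prefix]
        exact ⟨r, by simp⟩
      have hslice : PySem.List.slice lab (some (src.length : Int)) none = '-' :: r := by
        rw [PySem.List.slice_some_none, PySem.List.clampIdx_natCast, hlab]
        simp
      simp [pvLoopA, heq, hsw, hslice, ht]

-- one step of A's loop when the head differs from this key
lemma pvLoopA_miss (src dst : List Char) (rest : List (List Char × List Char)) (lab : List Char)
    (hs : '-' ∉ src) (hh : (pvPartitionHyphen lab).1 ≠ src) :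
    pvLoopA ((src, dst) :: rest) lab = pvLoopA rest lab := by
  have heq : lab ≠ src := by
    intro h; exact hh (by rw [h, pvPartition_of_no_hyphen src hs])
  have hsw : ¬ PySem.Chars.startswith lab (src ++ ['-']) = true := by
    intro h
    simp only [PySem.Chars.startswith, List.isPrefixOf_iff_prefix] at h
    rcases h with ⟨r, hr⟩
    have : lab = src ++ '-' :: r := by simpa using hr.symm
    exact hh (by rw [this, pvPartition_hyphen_split src r hs])
  simp [pvLoopA, heq, hsw]

-- A's whole loop computes B's lookup-of-the-head, suffix reattached
lemma pvLoopA_eq_lookup (lab : List Char) :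
    pvLoopA pvRegional lab =
      (PySem.Dict.get? (PySem.Dict.mk pvRegional) (pvPartitionHyphen lab).1).map
        (fun dst => dst ++ (pvPartitionHyphen lab).2) := by
  by_cases h1 : (pvPartitionHyphen lab).1 = "Hisuian".toList
  · rw [show pvRegional = ("Hisuian".toList, "Hisui".toList) :: pvRegional.tail from rfl,
      pvLoopA_hit _ _ _ _ (by decide) h1]
    simp [PySem.Dict.get?, pvRegional, h1]
  rw [show pvRegional = ("Hisuian".toList, "Hisui".toList) :: pvRegional.tail from rfl,
    pvLoopA_miss _ _ _ _ (by decide) h1,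
    show pvRegional.tail = ("Alolan".toList, "Alola".toList) :: pvRegional.tail.tail from rfl]
  by_cases h2 : (pvPartitionHyphen lab).1 = "Alolan".toList
  · rw [pvLoopA_hit _ _ _ _ (by decide) h2]
    simp [PySem.Dict.get?, pvRegional, h2]
  rw [pvLoopA_miss _ _ _ _ (by decide) h2,
    show pvRegional.tail.tail =
      [("Galarian".toList, "Galar".toList), ("Paldean".toList, "Paldea".toList)] from rfl]
  by_cases h3 : (pvPartitionHyphen lab).1 = "Galarian".toList
  · rw [pvLoopA_hit _ _ _ _ (by decide) h3]
    simp [PySem.Dict.get?, h3]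
  rw [pvLoopA_miss _ _ _ _ (by decide) h3]
  by_cases h4 : (pvPartitionHyphen lab).1 = "Paldean".toList
  · rw [pvLoopA_hit _ _ _ _ (by decide) h4]
    simp [PySem.Dict.get?, h4]
  · rw [pvLoopA_miss _ _ _ _ (by decide) h4]
    simp [pvLoopA, PySem.Dict.get?, pvRegional]
    exact ⟨fun h => h1 h.symm, fun h => h2 h.symm, fun h => h3 h.symm, fun h => h4 h.symm⟩

-- ===== VERDICT (by name: the statement is the Claim_ definition above) =====
theorem normalize_form_label_py_spec : Claim_equal_normalize_form_label_py := by
  intro label _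
  unfold Spec_normalize_form_label_py normalize_form_label_py normalize_form_label_py_alt
  by_cases hnil : label.toList = []
  · simp [hnil]
  · simp only [hnil]
    rw [pvLoopA_eq_lookup]
    cases PySem.Dict.get? (PySem.Dict.mk pvRegional) (pvPartitionHyphen label.toList).1 <;> simp
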